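-- pv_equiv track=rewrite | github.com/Ayala-Yagelnik/local-devops-mcp | src/health.py | detect_health_check_type
-- ===== SOURCE A (Python) =====
-- def detect_health_check_type(image_name: str, port: int) -> str:
--     """
--     Detect appropriate health check type based on image and port.
--
--     Args:
--         image_name: Docker image name (e.g., "postgres:15", "nginx:latest")
--         port: Container port number
--
--     Returns:
--         str: Health check endpoint URL
--     """
--     image_lower = image_name.lower()
--
--     # Database services - use TCP
--     if any(db in image_lower for db in ['postgres', 'mysql', 'mongodb', 'mariadb']):
--         return f"tcp://localhost:{port}"
--
--     # Cache services - use TCP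
--     if any(cache in image_lower for cache in ['redis', 'memcached']):
--         return f"tcp://localhost:{port}"
--
--     # Message queues - use TCP
--     if any(queue in image_lower for queue in ['rabbitmq', 'kafka', 'nats']):
--         return f"tcp://localhost:{port}"
--
--     # Web servers - try HTTP first, fallback to TCP
--     if any(web in image_lower for web in ['nginx', 'apache', 'httpd', 'caddy']):
--         return f"http://localhost:{port}"
--
--     # Application servers - try HTTP with health endpoint
--     if any(app in image_lower for app in ['api', 'app', 'server', 'service']):
--         return f"http://localhost:{port}/health"
--
--     # Frontend frameworks - use HTTP
--     if any(frontend in image_lower for frontend in ['react', 'vue', 'angular', 'next']):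
--         return f"http://localhost:{port}"
--
--     # Default to TCP for unknown services
--     return f"tcp://localhost:{port}"
-- ===== SOURCE B (Python) =====
-- _CATEGORY_URLS = [
--     "tcp://localhost:{}",
--     "http://localhost:{}",
--     "http://localhost:{}/health",
--     "http://localhost:{}",
--     "tcp://localhost:{}",
-- ]
--
-- _KEYWORD_RANK = {
--     'postgres': 0, 'mysql': 0, 'mongodb': 0, 'mariadb': 0,
--     'redis': 0, 'memcached': 0,
--     'rabbitmq': 0, 'kafka': 0, 'nats': 0,
--     'nginx': 1, 'apache': 1, 'httpd': 1, 'caddy': 1,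
--     'api': 2, 'app': 2, 'server': 2, 'service': 2,
--     'react': 3, 'vue': 3, 'angular': 3, 'next': 3,
-- }
--
--
-- def detect_health_check_type(image_name: str, port: int) -> str:
--     """Priority-minimisation variant: each keyword carries a category rank;
--     a single branch-free pass keeps the smallest rank among matching keywords
--     (default: the last, 'unknown' rank) and the URL template is then selected
--     by that rank -- no ordered chain of early returns."""
--     image_lower = image_name.lower()
--     best = len(_CATEGORY_URLS) - 1
--     for keyword, rank in _KEYWORD_RANK.items():
--         if rank < best and keyword in image_lower:
--             best = rank
--     return _CATEGORY_URLS[best].format(port)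
-- ===== Notes on version B (the rewrite author's own statement) =====
-- stated objective: alternative
-- what changed: Replaces the ordered early-return branch chain by a priority-minimisation pass: every keyword is mapped to a category rank, one branch-free loop keeps the minimum rank among matching keywords, and the URL template is selected by indexing into a table with that rank.
import Mathlib
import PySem

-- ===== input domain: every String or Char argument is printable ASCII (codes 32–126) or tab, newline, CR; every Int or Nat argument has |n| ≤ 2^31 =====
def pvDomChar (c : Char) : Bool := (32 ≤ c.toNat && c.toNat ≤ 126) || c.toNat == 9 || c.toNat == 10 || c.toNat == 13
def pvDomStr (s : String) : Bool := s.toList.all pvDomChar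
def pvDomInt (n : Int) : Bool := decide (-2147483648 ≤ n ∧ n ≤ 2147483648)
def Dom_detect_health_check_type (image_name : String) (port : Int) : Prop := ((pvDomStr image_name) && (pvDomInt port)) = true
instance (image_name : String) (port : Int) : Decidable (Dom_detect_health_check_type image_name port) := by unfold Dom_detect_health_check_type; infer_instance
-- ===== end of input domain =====

-- B replaces A's ordered early-return branch chain by a priority-minimisation pass (min rank over matching keywords, URL chosen by rank index); alternative structure, same cost.


-- ===== PORT A =====
def detect_health_check_type (image_name : String) (port : Int) : String :=
  let image_lower := PySem.Str.lower image_name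
  if (["postgres", "mysql", "mongodb", "mariadb"] : List String).any
      (fun db => PySem.Str.isIn db image_lower) then
    "tcp://localhost:" ++ PySem.Int.toStr port
  else if (["redis", "memcached"] : List String).any
      (fun cache => PySem.Str.isIn cache image_lower) then
    "tcp://localhost:" ++ PySem.Int.toStr port
  else if (["rabbitmq", "kafka", "nats"] : List String).any
      (fun queue => PySem.Str.isIn queue image_lower) then
    "tcp://localhost:" ++ PySem.Int.toStr port
  else if (["nginx", "apache", "httpd", "caddy"] : List String).any
      (fun web => PySem.Str.isIn web image_lower) then
    "http://localhost:" ++ PySem.Int.toStr port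
  else if (["api", "app", "server", "service"] : List String).any
      (fun app => PySem.Str.isIn app image_lower) then
    "http://localhost:" ++ PySem.Int.toStr port ++ "/health"
  else if (["react", "vue", "angular", "next"] : List String).any
      (fun frontend => PySem.Str.isIn frontend image_lower) then
    "http://localhost:" ++ PySem.Int.toStr port
  else
    "tcp://localhost:" ++ PySem.Int.toStr port

-- ===== PORT B =====
-- _CATEGORY_URLS, with "{}".format(port) applied (exact: port's str is spliced in)
def pvCategoryUrls (port : Int) : List String :=
  [ "tcp://localhost:" ++ PySem.Int.toStr port,
    "http://localhost:" ++ PySem.Int.toStr port,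
    "http://localhost:" ++ PySem.Int.toStr port ++ "/health",
    "http://localhost:" ++ PySem.Int.toStr port,
    "tcp://localhost:" ++ PySem.Int.toStr port ]

-- _KEYWORD_RANK.items() in insertion order (ranks are small nonnegative literals, so Nat is exact)
def pvKeywordRank : List (String × Nat) :=
  [ ("postgres", 0), ("mysql", 0), ("mongodb", 0), ("mariadb", 0),
    ("redis", 0), ("memcached", 0),
    ("rabbitmq", 0), ("kafka", 0), ("nats", 0),
    ("nginx", 1), ("apache", 1), ("httpd", 1), ("caddy", 1),
    ("api", 2), ("app", 2), ("server", 2), ("service", 2),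
    ("react", 3), ("vue", 3), ("angular", 3), ("next", 3) ]

def detect_health_check_type_alt (image_name : String) (port : Int) : String :=
  let image_lower := PySem.Str.lower image_name
  -- best = len(_CATEGORY_URLS) - 1; the for-loop keeps the minimum matching rank
  let best := pvKeywordRank.foldl
    (fun b p => if p.2 < b ∧ PySem.Str.isIn p.1 image_lower then p.2 else b)
    (pvCategoryUrls port).length.pred
  -- _CATEGORY_URLS[best]: best is always in range, so getD is exact here
  (pvCategoryUrls port).getD best ""

-- ===== PRECONDITION & SPEC =====
def Spec_detect_health_check_type (image_name : String) (port : Int) (out : String) : Prop := out = detect_health_check_type_alt image_name port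
instance (image_name : String) (port : Int) (out : String) : Decidable (Spec_detect_health_check_type image_name port out) := by unfold Spec_detect_health_check_type; infer_instance

-- ===== CLAIM (what is proved, stated in full; the proofs are below) =====
def Claim_equal_detect_health_check_type : Prop := ∀ (image_name : String) (port : Int), Dom_detect_health_check_type image_name port → Spec_detect_health_check_type image_name port (detect_health_check_type image_name port)

-- ===== LEMMAS AND PROOFS =====

-- the min-accumulator fold over a group of keywords that all carry the same rank r
theorem pv_fold_const_rank (s : String) (r best : Nat) (kws : List String) :
    List.foldl (fun b (p : String × Nat) => if p.2 < b ∧ PySem.Str.isIn p.1 s then p.2 else b)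
      best (kws.map (fun kw => (kw, r)))
    = if r < best ∧ kws.any (fun kw => PySem.Str.isIn kw s) then r else best := by
  induction kws generalizing best with
  | nil => simp
  | cons k ks ih =>
    simp only [List.map_cons, List.foldl_cons, List.any_cons]
    by_cases hk : PySem.Str.isIn k s = true
    · by_cases hr : r < best
      · rw [if_pos ⟨hr, hk⟩, ih]
        simp_all
      · rw [if_neg (by tauto), ih]
        simp [hr]
    · rw [if_neg (by tauto), ih]
      simp_all

-- ===== VERDICT (by name: the statement is the Claim_ definition above) =====
theorem detect_health_check_type_spec : Claim_equal_detect_health_check_type := by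
  intro image_name port _
  unfold Spec_detect_health_check_type detect_health_check_type detect_health_check_type_alt
  set L := PySem.Str.lower image_name with hL
  have hsplit : pvKeywordRank =
      ((["postgres", "mysql", "mongodb", "mariadb", "redis", "memcached",
         "rabbitmq", "kafka", "nats"] : List String).map (fun kw => (kw, 0)))
      ++ ((["nginx", "apache", "httpd", "caddy"] : List String).map (fun kw => (kw, 1)))
      ++ ((["api", "app", "server", "service"] : List String).map (fun kw => (kw, 2)))
      ++ ((["react", "vue", "angular", "next"] : List String).map (fun kw => (kw, 3))) := by
    rfl
  rw [hsplit]
  simp only [List.foldl_append, pv_fold_const_rank]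
  by_cases h0a : (["postgres", "mysql", "mongodb", "mariadb"] : List String).any
      (fun kw => PySem.Str.isIn kw L) = true <;>
  by_cases h0b : (["redis", "memcached"] : List String).any
      (fun kw => PySem.Str.isIn kw L) = true <;>
  by_cases h0c : (["rabbitmq", "kafka", "nats"] : List String).any
      (fun kw => PySem.Str.isIn kw L) = true <;>
  by_cases h1 : (["nginx", "apache", "httpd", "caddy"] : List String).any
      (fun kw => PySem.Str.isIn kw L) = true <;>
  by_cases h2 : (["api", "app", "server", "service"] : List String).any
      (fun kw => PySem.Str.isIn kw L) = true <;>
  by_cases h3 : (["react", "vue", "angular", "next"] : List String).any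
      (fun kw => PySem.Str.isIn kw L) = true <;>
  simp_all [pvCategoryUrls, List.any_cons]
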